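-- pv_equiv track=rewrite | github.com/Arsen1302/Code-copy-detector | TestData/solutions/problem_1062_1.py | solution_1062_1
-- ===== SOURCE A (Python) =====
-- def solution_1062_1(s: str) -> int:
--     total = s.count('1')
--     if total % 3: return 0
--     n = len(s)
--     if not total: return (1+n-2) * (n-2) // 2 % 1000000007
--     avg, ans = total // 3, 0
--     cnt = first_part_right_zeros = last_part_left_zeros = 0
--     for i in range(n):
--         if s[i] == '1': cnt += 1
--         elif cnt == avg: first_part_right_zeros += 1
--         elif cnt > avg: break
--     cnt = 0
--     for i in range(n-1, -1, -1):
--         if s[i] == '1': cnt += 1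
--         elif cnt == avg: last_part_left_zeros += 1
--         elif cnt > avg: break
--     return (first_part_right_zeros+1) * (last_part_left_zeros+1) % 1000000007
-- ===== SOURCE B (Python) =====
-- def solution_1062_1(s: str) -> int:
--     # one pass: collect indices of '1's; the answer is the product of the two
--     # gaps between consecutive ones at the 1/3 and 2/3 boundaries
--     ones = [i for i, c in enumerate(s) if c == '1']
--     t = len(ones)
--     if t % 3:
--         return 0
--     n = len(s)
--     if not t:
--         return (n - 1) * (n - 2) // 2 % 1000000007
--     avg = t // 3
--     return (ones[avg] - ones[avg - 1]) * (ones[2 * avg] - ones[2 * avg - 1]) % 1000000007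
-- ===== Notes on version B (the rewrite author's own statement) =====
-- stated objective: simpler
-- what changed: Replaces A's two directional scan-with-break loops by one pass collecting the positions of the set bits, reading the answer off as the product of the two position gaps at the one-third and two-thirds boundaries.
import Mathlib
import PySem

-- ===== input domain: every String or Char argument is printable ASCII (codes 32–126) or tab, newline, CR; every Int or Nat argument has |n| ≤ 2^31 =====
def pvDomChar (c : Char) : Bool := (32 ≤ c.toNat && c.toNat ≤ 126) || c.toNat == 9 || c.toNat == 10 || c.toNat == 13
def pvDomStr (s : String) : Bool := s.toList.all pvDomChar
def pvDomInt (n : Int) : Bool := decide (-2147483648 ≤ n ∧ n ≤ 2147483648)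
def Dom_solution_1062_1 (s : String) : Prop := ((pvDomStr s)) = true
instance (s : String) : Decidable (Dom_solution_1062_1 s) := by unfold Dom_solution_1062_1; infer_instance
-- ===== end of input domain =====

-- B replaces A's two directional scan-with-break loops by one pass collecting the
-- positions of the set bits and reading the answer off the two boundary gaps (simpler).

-- ===== PORT A =====
-- one loop body used for both of A's scans (the backward scan runs it on the reversed list)
def pvLoopA (avg : Int) : List Char → Int → Int → Int
  | [], _, acc => acc
  | c :: rest, cnt, acc =>
    if c = '1' then pvLoopA avg rest (cnt + 1) acc
    else if cnt = avg then pvLoopA avg rest cnt (acc + 1)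
    else if avg < cnt then acc
    else pvLoopA avg rest cnt acc

def solution_1062_1 (s : String) : Int :=
  let total : Int := (PySem.Str.count s "1" : Int)
  if PySem.Int.mod total 3 ≠ 0 then 0
  else
    let n : Int := PySem.Str.len s
    if total = 0 then PySem.Int.mod (PySem.Int.floordiv ((1 + n - 2) * (n - 2)) 2) 1000000007
    else
      let avg : Int := PySem.Int.floordiv total 3
      let first_part_right_zeros := pvLoopA avg s.toList 0 0
      let last_part_left_zeros := pvLoopA avg s.toList.reverse 0 0
      PySem.Int.mod ((first_part_right_zeros + 1) * (last_part_left_zeros + 1)) 1000000007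

-- ===== PORT B =====
-- the filtering comprehension over enumerate(s), carried as the running index
def pvOnes (i : Int) : List Char → List Int
  | [] => []
  | c :: r => if c = '1' then i :: pvOnes (i + 1) r else pvOnes (i + 1) r

-- list indexing ones[k]: every index used is proven in range, so pyGetD's default is unreachable
def solution_1062_1_alt (s : String) : Int :=
  let ones := pvOnes 0 s.toList
  let t : Int := (ones.length : Int)
  if PySem.Int.mod t 3 ≠ 0 then 0
  else
    let n : Int := PySem.Str.len s
    if t = 0 then PySem.Int.mod (PySem.Int.floordiv ((n - 1) * (n - 2)) 2) 1000000007
    else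
      let avg : Int := PySem.Int.floordiv t 3
      PySem.Int.mod
        ((PySem.List.pyGetD ones avg 0 - PySem.List.pyGetD ones (avg - 1) 0) *
          (PySem.List.pyGetD ones (2 * avg) 0 - PySem.List.pyGetD ones (2 * avg - 1) 0))
        1000000007

-- ===== PRECONDITION & SPEC =====
def Spec_solution_1062_1 (s : String) (out : Int) : Prop := out = solution_1062_1_alt s
instance (s : String) (out : Int) : Decidable (Spec_solution_1062_1 s out) := by unfold Spec_solution_1062_1; infer_instance

-- ===== CLAIM (what is proved, stated in full; the proofs are below) =====
def Claim_equal_solution_1062_1 : Prop := ∀ (s : String), Dom_solution_1062_1 s → Spec_solution_1062_1 s (solution_1062_1 s)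

-- ===== LEMMAS AND PROOFS =====

-- nat-indexed list of positions of '1'
def pvO : List Char → List Nat
  | [] => []
  | c :: r => if c = '1' then 0 :: (pvO r).map (· + 1) else (pvO r).map (· + 1)

-- number of leading non-'1' characters
def pvLZ : List Char → Nat
  | [] => 0
  | c :: r => if c = '1' then 0 else pvLZ r + 1

-- drop everything up to and including the k-th '1'
def pvAfter : Nat → List Char → List Char
  | 0, l => l
  | _ + 1, [] => []
  | k + 1, c :: r => if c = '1' then pvAfter k r else pvAfter (k + 1) r

theorem pvOnes_eq (l : List Char) : ∀ i : Int, pvOnes i l = (pvO l).map (fun (j : Nat) => i + (j : Int)) := by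
  induction l with
  | nil => intro i; simp [pvOnes, pvO]
  | cons c r ih =>
    intro i
    by_cases hc : c = '1'
    · simp only [pvOnes, pvO, if_pos hc, ih (i + 1), List.map_cons, List.map_map, List.cons.injEq]
      refine ⟨by push_cast; ring, ?_⟩
      exact List.map_congr_left (fun j _ => by simp only [Function.comp_apply]; push_cast; ring)
    · simp only [pvOnes, pvO, if_neg hc, ih (i + 1), List.map_map]
      exact List.map_congr_left (fun j _ => by simp only [Function.comp_apply]; push_cast; ring)

theorem pvO_length (l : List Char) : (pvO l).length = l.count '1' := by
  induction l with
  | nil => simp [pvO]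
  | cons c r ih => by_cases hc : c = '1' <;> simp [pvO, hc, ih, List.count_cons]

theorem pvO_lt_length (l : List Char) : ∀ j ∈ pvO l, j < l.length := by
  induction l with
  | nil => simp [pvO]
  | cons c r ih =>
    intro j hj
    simp only [List.length_cons]
    by_cases hc : c = '1'
    · simp only [pvO, if_pos hc, List.mem_cons, List.mem_map] at hj
      rcases hj with h | ⟨a, ha, rfl⟩
      · omega
      · have := ih a ha; omega
    · simp only [pvO, if_neg hc, List.mem_map] at hj
      rcases hj with ⟨a, ha, rfl⟩; have := ih a ha; omega

theorem pvO_head (l : List Char) (h : 0 < (pvO l).length) : (pvO l)[0] = pvLZ l := by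
  induction l with
  | nil => simp [pvO] at h
  | cons c r ih =>
    by_cases hc : c = '1'
    · simp [pvO, pvLZ, hc]
    · have h' : 0 < (pvO r).length := by simpa [pvO, hc] using h
      simp [pvO, pvLZ, hc, List.getElem_map, ih h']

theorem pvGap (l : List Char) : ∀ k (hk : 1 ≤ k) (h : k < (pvO l).length),
    ((pvO l)[k] : Int) - ((pvO l)[k - 1]'(by omega) : Int) = (pvLZ (pvAfter k l) : Int) + 1 := by
  induction l with
  | nil => intro k hk h; simp [pvO] at h
  | cons c r ih =>
    intro k hk h
    cases k with
    | zero => omega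
    | succ k' =>
      by_cases hc : c = '1'
      · cases k' with
        | zero =>
          have h0 : 0 < (pvO r).length := by simp [pvO, hc] at h; omega
          have e : pvAfter 1 (c :: r) = r := by simp [pvAfter, hc]
          simp only [pvO, if_pos hc, List.getElem_cons_succ, List.getElem_cons_zero,
            List.getElem_map, Nat.sub_self, e, pvO_head r h0]
          push_cast; ring
        | succ m =>
          have h' : m + 1 < (pvO r).length := by simp [pvO, hc] at h; omega
          have hIH := ih (m + 1) (by omega) h'
          have e : pvAfter (m + 1 + 1) (c :: r) = pvAfter (m + 1) r := by
            simp [pvAfter, hc]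
          simp only [Nat.add_sub_cancel] at hIH ⊢
          simp only [pvO, if_pos hc, List.getElem_cons_succ, List.getElem_map, e]
          push_cast at hIH ⊢
          omega
      · have h' : k' + 1 < (pvO r).length := by simpa [pvO, hc] using h
        have hIH := ih (k' + 1) (by omega) h'
        have e : pvAfter (k' + 1) (c :: r) = pvAfter (k' + 1) r := by
          simp [pvAfter, hc]
        simp only [Nat.add_sub_cancel] at hIH ⊢
        simp only [pvO, if_neg hc, List.getElem_map, e]
        push_cast at hIH ⊢
        omega

theorem pvLoopA_gt (avg : Int) (l : List Char) : ∀ cnt acc, avg < cnt → pvLoopA avg l cnt acc = acc := by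
  induction l with
  | nil => intro cnt acc _; simp [pvLoopA]
  | cons c r ih =>
    intro cnt acc hlt
    by_cases hc : c = '1'
    · simp only [pvLoopA, if_pos hc]; exact ih (cnt + 1) acc (by omega)
    · simp only [pvLoopA, if_neg hc, if_neg (by omega : ¬ cnt = avg), if_pos hlt]

theorem pvLoopA_main (avg : Int) (l : List Char) : ∀ cnt acc, cnt ≤ avg →
    pvLoopA avg l cnt acc = acc + (pvLZ (pvAfter (avg - cnt).toNat l) : Int) := by
  induction l with
  | nil => intro cnt acc _; cases h : (avg - cnt).toNat <;> simp [pvLoopA, pvAfter, h, pvLZ]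
  | cons c r ih =>
    intro cnt acc hle
    by_cases he : cnt = avg
    · have e : (avg - cnt).toNat = 0 := by omega
      rw [e]
      by_cases hc : c = '1'
      · simp only [pvLoopA, if_pos hc, pvLoopA_gt avg r (cnt + 1) acc (by omega), pvAfter,
          pvLZ, if_pos hc, Nat.cast_zero, add_zero]
      · have := ih cnt (acc + 1) hle
        rw [e] at this
        simp only [pvLoopA, if_neg hc, if_pos he, this, pvAfter, pvLZ, if_neg hc]
        push_cast; ring
    · by_cases hc : c = '1'
      · have h1 : cnt + 1 ≤ avg := by omega
        have e : (avg - cnt).toNat = (avg - (cnt + 1)).toNat + 1 := by omega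
        rw [e]
        simp only [pvLoopA, if_pos hc, ih (cnt + 1) acc h1, pvAfter, if_pos hc]
      · obtain ⟨m, hm⟩ : ∃ m, (avg - cnt).toNat = m + 1 := ⟨(avg - cnt).toNat - 1, by omega⟩
        rw [hm]
        have := ih cnt acc hle
        rw [hm] at this
        simp only [pvLoopA, if_neg hc, if_neg he, if_neg (by omega : ¬ avg < cnt), this,
          pvAfter, if_neg hc]

theorem pvO_append (a b : List Char) : pvO (a ++ b) = pvO a ++ (pvO b).map (· + a.length) := by
  induction a with
  | nil => simp [pvO]
  | cons c r ih =>
    by_cases hc : c = '1' <;>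
      simp [pvO, hc, ih, List.map_map, Function.comp] <;>
      exact List.map_congr_left (fun j _ => by omega)

theorem pvO_reverse (l : List Char) :
    pvO l.reverse = ((pvO l).map (fun j => l.length - 1 - j)).reverse := by
  induction l with
  | nil => simp [pvO]
  | cons c r ih =>
    rw [List.reverse_cons, pvO_append, ih]
    by_cases hc : c = '1'
    · simp only [pvO, if_pos hc, List.map_cons, List.map_map, List.map_nil, List.reverse_cons,
        List.length_cons, List.length_reverse]
      congr 1
      · congr 1
        exact List.map_congr_left (fun j _ => by simp only [Function.comp_apply]; omega)
      · simp
    · simp only [pvO, if_neg hc, List.map_map, List.map_nil, List.append_nil, List.length_cons]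
      congr 1
      exact List.map_congr_left (fun j _ => by simp only [Function.comp_apply]; omega)

theorem pvCountGo (sub : List Char) (hsub : sub = ['1']) :
    ∀ fuel (l : List Char) acc, l.length ≤ fuel →
      PySem.Chars.count.go sub fuel l acc = acc + l.count '1' := by
  subst hsub
  intro fuel
  induction fuel with
  | zero =>
    intro l acc h
    have : l = [] := by cases l <;> simp_all
    subst this; simp [PySem.Chars.count.go]
  | succ f ih =>
    intro l acc h
    cases l with
    | nil => simp [PySem.Chars.count.go]
    | cons c t =>
      by_cases hc : c = '1'
      · have : List.isPrefixOf ['1'] (c :: t) = true := by simp [List.isPrefixOf, hc]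
        simp only [PySem.Chars.count.go, this, if_true]
        rw [show List.drop (['1'] : List Char).length (c :: t) = t by simp]
        rw [ih t (acc + 1) (by simpa using Nat.lt_succ_iff.mp (by simpa using h))]
        simp [List.count_cons, hc]; omega
      · have : List.isPrefixOf ['1'] (c :: t) = false := by
          simp [List.isPrefixOf]; exact fun hh => hc hh.symm
        simp only [PySem.Chars.count.go, this, if_false]
        rw [ih t acc (by simpa using Nat.lt_succ_iff.mp (by simpa using h))]
        simp [List.count_cons, hc]

theorem pvCount (s : String) : PySem.Str.count s "1" = s.toList.count '1' := by
  rw [PySem.Str.count_eq]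
  show PySem.Chars.count s.toList ['1'] = _
  simp only [PySem.Chars.count, List.isEmpty_iff]
  rw [if_neg (by simp)]
  simpa using pvCountGo ['1'] rfl s.toList.length s.toList 0 le_rfl

-- ===== VERDICT (by name: the statement is the Claim_ definition above) =====
theorem solution_1062_1_spec : Claim_equal_solution_1062_1 := by
  intro s _
  unfold Spec_solution_1062_1 solution_1062_1 solution_1062_1_alt
  set l := s.toList with hl
  have hones : pvOnes 0 l = (pvO l).map (fun (j : Nat) => (j : Int)) := by
    rw [pvOnes_eq l 0]; exact List.map_congr_left (fun j _ => by push_cast; ring)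
  have hlen : (pvOnes 0 l).length = l.count '1' := by
    rw [hones, List.length_map, pvO_length]
  have hcnt : PySem.Str.count s "1" = l.count '1' := pvCount s
  simp only [hcnt, hlen]
  set t0 := l.count '1' with ht0
  have hmod : PySem.Int.mod (t0 : Int) 3 = ((t0 % 3 : Nat) : Int) := by
    exact_mod_cast PySem.Int.mod_natCast t0 3
  by_cases h3 : t0 % 3 = 0
  · simp only [hmod, h3, Nat.cast_zero, ne_eq, not_true_eq_false, if_false]
    by_cases h0 : t0 = 0
    · simp only [h0, Nat.cast_zero, if_true]
      congr 1; congr 1; ring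
    · have hne : (t0 : Int) ≠ 0 := by exact_mod_cast h0
      simp only [hne, if_false]
      obtain ⟨m, hm⟩ : ∃ m, t0 = 3 * m := ⟨t0 / 3, by omega⟩
      have hm1 : 1 ≤ m := by omega
      have havg : PySem.Int.floordiv (t0 : Int) 3 = (m : Int) := by
        have h := PySem.Int.floordiv_natCast t0 3
        have h2 : t0 / 3 = m := by omega
        rw [h2] at h; exact_mod_cast h
      rw [havg]
      -- lengths and bounds
      have hOlen : (pvO l).length = t0 := pvO_length l
      have hb1 : m < (pvO l).length := by omega
      have hb2 : 2 * m < (pvO l).length := by omega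
      -- index lookups
      have hget : ∀ (k : Nat) (hk : k < (pvO l).length),
          PySem.List.pyGetD (pvOnes 0 l) (k : Int) 0 = ((pvO l)[k] : Int) := by
        intro k hk
        rw [hones, PySem.List.pyGetD_natCast, List.getD_eq_getElem?_getD]
        simp [List.getElem?_map, List.getElem?_eq_getElem hk]
      have hg1 : PySem.List.pyGetD (pvOnes 0 l) (m : Int) 0 = ((pvO l)[m]'hb1 : Int) := hget m hb1
      have hg2 : PySem.List.pyGetD (pvOnes 0 l) ((m : Int) - 1) 0 = ((pvO l)[m - 1]'(by omega) : Int) := by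
        have : ((m : Int) - 1) = ((m - 1 : Nat) : Int) := by omega
        rw [this]; exact hget (m - 1) (by omega)
      have hg3 : PySem.List.pyGetD (pvOnes 0 l) (2 * (m : Int)) 0 = ((pvO l)[2 * m]'hb2 : Int) := by
        have : (2 * (m : Int)) = ((2 * m : Nat) : Int) := by push_cast; ring
        rw [this]; exact hget (2 * m) hb2
      have hg4 : PySem.List.pyGetD (pvOnes 0 l) (2 * (m : Int) - 1) 0 = ((pvO l)[2 * m - 1]'(by omega) : Int) := by
        have : (2 * (m : Int) - 1) = ((2 * m - 1 : Nat) : Int) := by omega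
        rw [this]; exact hget (2 * m - 1) (by omega)
      rw [hg1, hg2, hg3, hg4]
      -- A's loops
      have hf : pvLoopA (m : Int) l 0 0 = (pvLZ (pvAfter m l) : Int) := by
        have := pvLoopA_main (m : Int) l 0 0 (by omega)
        simpa [(by omega : ((m : Int) - 0).toNat = m)] using this
      have hbwd : pvLoopA (m : Int) l.reverse 0 0 = (pvLZ (pvAfter m l.reverse) : Int) := by
        have := pvLoopA_main (m : Int) l.reverse 0 0 (by omega)
        simpa [(by omega : ((m : Int) - 0).toNat = m)] using this
      rw [hf, hbwd]
      -- forward gap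
      have hgapF : ((pvO l)[m]'hb1 : Int) - ((pvO l)[m - 1]'(by omega) : Int)
          = (pvLZ (pvAfter m l) : Int) + 1 := pvGap l m hm1 hb1
      -- backward gap via reversal
      have hrevlen : (pvO l.reverse).length = t0 := by
        rw [pvO_reverse]; simp [hOlen]
      have hbR1 : m < (pvO l.reverse).length := by omega
      have hgapR : ((pvO l.reverse)[m]'hbR1 : Int) - ((pvO l.reverse)[m - 1]'(by omega) : Int)
          = (pvLZ (pvAfter m l.reverse) : Int) + 1 := pvGap l.reverse m hm1 hbR1
      have hrev : ∀ (k : Nat) (hk : k < (pvO l).length),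
          ((pvO l.reverse)[t0 - 1 - k]'(by omega) : Nat) = l.length - 1 - ((pvO l)[k]'hk) := by
        intro k hk
        have e := pvO_reverse l
        have h1 : t0 - 1 - k < (pvO l.reverse).length := by omega
        rw [List.getElem_of_eq e, List.getElem_reverse]
        have e2 : ((pvO l).map (fun j => l.length - 1 - j)).length - 1 - (t0 - 1 - k) = k := by
          simp only [List.length_map, hOlen]; omega
        simp only [e2, List.getElem_map]
      have hRm : ((pvO l.reverse)[m]'hbR1 : Nat) = l.length - 1 - ((pvO l)[2 * m - 1]'(by omega)) := by
        have h := hrev (2 * m - 1) (by omega)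
        simp only [show t0 - 1 - (2 * m - 1) = m by omega] at h
        exact h
      have hRm1 : ((pvO l.reverse)[m - 1]'(by omega) : Nat) = l.length - 1 - ((pvO l)[2 * m]'hb2) := by
        have h := hrev (2 * m) hb2
        simp only [show t0 - 1 - 2 * m = m - 1 by omega] at h
        exact h
      have hx1 : ((pvO l)[2 * m - 1]'(by omega)) < l.length :=
        pvO_lt_length l _ (List.getElem_mem _)
      have hx2 : ((pvO l)[2 * m]'hb2) < l.length :=
        pvO_lt_length l _ (List.getElem_mem _)
      have hgapB : ((pvO l)[2 * m]'hb2 : Int) - ((pvO l)[2 * m - 1]'(by omega) : Int)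
          = (pvLZ (pvAfter m l.reverse) : Int) + 1 := by
        rw [← hgapR, hRm, hRm1]
        push_cast [Nat.cast_sub (by omega : 1 ≤ l.length)]
        omega
      rw [← hgapF, ← hgapB]
  · have h3' : ((t0 % 3 : Nat) : Int) ≠ 0 := by exact_mod_cast h3
    rw [hmod, if_pos h3', if_pos h3']
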